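-- pv_equiv track=rewrite | github.com/Josh050608/orim_convert | orim_engine/orim_server.py | factorial_number_system
-- ===== SOURCE A (Python) =====
-- from typing import List, Tuple, Dict
-- from math import factorial, log2
--
-- def factorial_number_system(rank: int, n: int) -> List[int]:
--     """
--     Convert rank to permutation using Factorial Number System (Lehmer code)
--
--     Args:
--         rank: Integer rank (0 to n!-1)
--         n: Size of permutation
--
--     Returns:
--         Lehmer code representation [c_{n-1}, c_{n-2}, ..., c_1, c_0]
--     """
--     lehmer = []
--     for i in range(n, 0, -1):
--         fact = factorial(i - 1)
--         c = rank // fact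
--         lehmer.append(c)
--         rank %= fact
--     return lehmer
-- ===== SOURCE B (Python) =====
-- def factorial_number_system(rank: int, n: int):
--     """Lehmer code of rank: one pass dividing by 1,2,...,n-1 (no factorials)."""
--     digits = []
--     for i in range(1, n):
--         digits.append(rank % i)
--         rank //= i
--     if n >= 1:
--         digits.append(rank)
--     digits.reverse()
--     return digits
-- ===== Notes on version B (the rewrite author's own statement) =====
-- stated objective: faster
-- what changed: Instead of recomputing factorial(i-1) from scratch for every position and dividing the rank by it, B extracts the digits least-significant first by successive divmod by 1,2,...,n-1 and reverses, so no factorial is ever computed.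
import Mathlib
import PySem

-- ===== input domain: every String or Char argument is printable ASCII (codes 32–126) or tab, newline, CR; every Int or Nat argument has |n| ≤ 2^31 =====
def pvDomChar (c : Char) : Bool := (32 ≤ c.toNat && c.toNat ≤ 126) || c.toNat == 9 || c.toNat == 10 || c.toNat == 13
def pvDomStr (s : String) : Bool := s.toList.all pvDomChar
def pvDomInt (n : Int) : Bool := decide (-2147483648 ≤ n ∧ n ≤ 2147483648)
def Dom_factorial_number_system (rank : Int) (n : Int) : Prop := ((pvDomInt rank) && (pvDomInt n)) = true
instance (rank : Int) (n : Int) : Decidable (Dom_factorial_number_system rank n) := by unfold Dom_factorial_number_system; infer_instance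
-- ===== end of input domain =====

-- B replaces A's per-position factorial computation with one pass of successive divmod by
-- 1,2,...,n-1 (digits built least-significant first, then reversed); objective: faster.

-- ===== PORT A =====
-- literal port of A: for i in range(n, 0, -1): fact = factorial(i-1); c = rank // fact;
-- lehmer.append(c); rank %= fact
def factorial_number_system (rank : Int) (n : Int) : List Int :=
  (((PySem.List.pyRange n 0 (-1)).foldl
    (fun (st : List Int × Int) i =>
      let fact : Int := (Nat.factorial (i - 1).toNat : Int)
      (st.1 ++ [PySem.Int.floordiv st.2 fact], PySem.Int.mod st.2 fact))
    ([], rank))).1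

-- ===== PORT B =====
-- literal port of Source B: for i in range(1, n): digits.append(rank % i); rank //= i;
-- then if n >= 1: digits.append(rank); digits.reverse()
def factorial_number_system_alt (rank : Int) (n : Int) : List Int :=
  let st := (PySem.List.pyRange 1 n 1).foldl
    (fun (st : List Int × Int) i =>
      (st.1 ++ [PySem.Int.mod st.2 i], PySem.Int.floordiv st.2 i)) ([], rank)
  let digits := if 1 ≤ n then st.1 ++ [st.2] else st.1
  digits.reverse

-- ===== PRECONDITION & SPEC =====
def Spec_factorial_number_system (rank : Int) (n : Int) (out : List Int) : Prop := out = factorial_number_system_alt rank n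
instance (rank : Int) (n : Int) (out : List Int) : Decidable (Spec_factorial_number_system rank n out) := by unfold Spec_factorial_number_system; infer_instance

-- ===== CLAIM (what is proved, stated in full; the proofs are below) =====
def Claim_equal_factorial_number_system : Prop := ∀ (rank : Int) (n : Int), Dom_factorial_number_system rank n → Spec_factorial_number_system rank n (factorial_number_system rank n)

-- ===== LEMMAS AND PROOFS =====

-- product i * (i+1) * ... * (i+k-1)
def pvP : Int → Nat → Int
  | _, 0 => 1
  | i, (k+1) => i * pvP (i+1) k

-- common spec: the k+1 Lehmer digits of r for bases starting at i, most significant first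
def pvS : Int → Int → Nat → List Int
  | _, r, 0 => [r]
  | i, r, (k+1) => (r / pvP i (k+1)) :: pvS i (r % pvP i (k+1)) k

-- B's unreversed digit list: k divmod steps with bases i, i+1, ..., then the final quotient
def pvD : Int → Nat → Int → List Int
  | _, 0, r => [r]
  | i, (k+1), r => (r % i) :: pvD (i+1) k (r / i)

theorem pvP_pos : ∀ (k : Nat) (i : Int), 1 ≤ i → 0 < pvP i k := by
  intro k
  induction k with
  | zero => intro i _; simp [pvP]
  | succ k ih =>
    intro i hi
    have := ih (i+1) (by omega)
    simp only [pvP]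
    positivity

theorem pvP_succ_right : ∀ (k : Nat) (i : Int), pvP i (k+1) = pvP i k * (i + k) := by
  intro k
  induction k with
  | zero => intro i; simp [pvP]
  | succ k ih =>
    intro i
    calc pvP i (k+2) = i * pvP (i+1) (k+1) := rfl
    _ = i * (pvP (i+1) k * ((i+1) + k)) := by rw [ih]
    _ = (i * pvP (i+1) k) * (i + (k+1)) := by ring
    _ = pvP i (k+1) * (i + (k+1)) := rfl

theorem pvP_one_factorial : ∀ (k : Nat), pvP 1 k = (Nat.factorial k : Int) := by
  intro k
  induction k with
  | zero => simp [pvP, Nat.factorial]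
  | succ k ih =>
    rw [pvP_succ_right, ih, Nat.factorial_succ]
    push_cast; ring

-- the digit identity (a % (b*c)) / b = (a / b) % c for positive b, c
theorem pv_digit_identity (a b c : Int) (hb : 0 < b) (_hc : 0 < c) :
    (a % (b * c)) / b = (a / b) % c := by
  have hq : a % (b * c) = a + (-(c * (a / (b * c)))) * b := by
    rw [Int.emod_def]; ring
  have h2 : (a % (b * c)) / b = a / b + (-(c * (a / (b * c)))) := by
    rw [hq, Int.add_mul_ediv_right _ _ (by omega : b ≠ 0)]
  have h4 : a / b / c = a / (b * c) := Int.ediv_ediv_of_nonneg (by omega)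
  have h3 : (a / b) % c = a / b - c * (a / (b * c)) := by
    rw [Int.emod_def, h4]
  omega

-- key step: appending the least-significant digit to the shifted spec gives the spec
theorem pvS_step : ∀ (k : Nat) (i r : Int), 1 ≤ i →
    pvS (i+1) (r / i) k ++ [r % i] = pvS i r (k+1) := by
  intro k
  induction k with
  | zero =>
    intro i r hi
    simp [pvS, pvP]
  | succ k ih =>
    intro i r hi
    have hM : 0 < pvP (i+1) (k+1) := pvP_pos (k+1) (i+1) (by omega)
    have hhead : r / i / pvP (i+1) (k+1) = r / (i * pvP (i+1) (k+1)) :=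
      Int.ediv_ediv_of_nonneg (by omega)
    have hb : (r / i) % pvP (i+1) (k+1) = (r % (i * pvP (i+1) (k+1))) / i :=
      (pv_digit_identity r i (pvP (i+1) (k+1)) (by omega) hM).symm
    have hc : r % i = (r % (i * pvP (i+1) (k+1))) % i :=
      (Int.emod_emod_of_dvd r ⟨pvP (i+1) (k+1), rfl⟩).symm
    calc pvS (i+1) (r / i) (k+1) ++ [r % i]
        = (r / i / pvP (i+1) (k+1)) ::
          (pvS (i+1) ((r / i) % pvP (i+1) (k+1)) k ++ [r % i]) := by simp [pvS]
    _ = (r / (i * pvP (i+1) (k+1))) ::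
          (pvS (i+1) ((r % (i * pvP (i+1) (k+1))) / i) k
            ++ [(r % (i * pvP (i+1) (k+1))) % i]) := by rw [hhead, hb, hc]
    _ = (r / (i * pvP (i+1) (k+1))) :: pvS i (r % (i * pvP (i+1) (k+1))) (k+1) := by
          rw [ih i (r % (i * pvP (i+1) (k+1))) hi]
    _ = pvS i r (k+2) := by simp [pvS, pvP]

theorem pvD_reverse : ∀ (k : Nat) (i r : Int), 1 ≤ i →
    (pvD i k r).reverse = pvS i r k := by
  intro k
  induction k with
  | zero => intro i r _; simp [pvD, pvS]
  | succ k ih =>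
    intro i r hi
    have : (pvD i (k+1) r).reverse = (pvD (i+1) k (r / i)).reverse ++ [r % i] := by
      simp [pvD]
    rw [this, ih (i+1) (r / i) (by omega), pvS_step k i r hi]

-- A's loop computes the spec (fold over range(n,0,-1), n = k+1)
theorem pvA_loop : ∀ (k : Nat) (r : Int) (acc : List Int),
    (((PySem.List.pyRange ((k : Int) + 1) 0 (-1)).foldl
      (fun (st : List Int × Int) i =>
        (st.1 ++ [PySem.Int.floordiv st.2 ((Nat.factorial (i - 1).toNat : Nat) : Int)],
         PySem.Int.mod st.2 ((Nat.factorial (i - 1).toNat : Nat) : Int)))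
      (acc, r))).1 = acc ++ pvS 1 r k := by
  intro k
  induction k with
  | zero =>
    intro r acc
    simp only [Nat.cast_zero]
    rw [PySem.List.pyRange_neg_one_cons (by omega : (0:Int) < 0 + 1)]
    rw [PySem.List.pyRange_neg_one_eq_nil (by omega : (0:Int) + 1 - 1 ≤ 0)]
    simp [pvS]
  | succ k ih =>
    intro r acc
    simp only [Nat.cast_add, Nat.cast_one]
    rw [PySem.List.pyRange_neg_one_cons (by omega : (0:Int) < (k:Int) + 1 + 1)]
    have h1 : ((k:Int) + 1 + 1 - 1).toNat = k + 1 := by omega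
    have h2 : (k:Int) + 1 + 1 - 1 = (k:Int) + 1 := by ring
    have hf : (0:Int) < ((Nat.factorial (k+1) : Nat) : Int) := by
      exact_mod_cast Nat.factorial_pos (k+1)
    simp only [List.foldl_cons, h1]
    rw [h2, ih]
    have hP : (((Nat.factorial (k+1) : Nat) : Int)) = pvP 1 (k+1) := (pvP_one_factorial (k+1)).symm
    have hs : acc ++ pvS 1 r (k+1)
        = (acc ++ [PySem.Int.floordiv r ((Nat.factorial (k+1) : Nat) : Int)])
          ++ pvS 1 (PySem.Int.mod r ((Nat.factorial (k+1) : Nat) : Int)) k := by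
      rw [PySem.Int.floordiv_eq_ediv_of_pos hf, PySem.Int.mod_eq_emod_of_pos hf, hP]
      simp [pvS]
    rw [hs]

-- B's loop produces the unreversed digit list (fold over range(i, i+k, 1))
theorem pvB_loop : ∀ (k : Nat) (i r : Int) (acc : List Int), 1 ≤ i →
    (((PySem.List.pyRange i (i + (k : Int)) 1).foldl
      (fun (st : List Int × Int) j =>
        (st.1 ++ [PySem.Int.mod st.2 j], PySem.Int.floordiv st.2 j)) (acc, r))).1
    ++ [(((PySem.List.pyRange i (i + (k : Int)) 1).foldl
      (fun (st : List Int × Int) j =>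
        (st.1 ++ [PySem.Int.mod st.2 j], PySem.Int.floordiv st.2 j)) (acc, r))).2]
    = acc ++ pvD i k r := by
  intro k
  induction k with
  | zero =>
    intro i r acc _
    rw [PySem.List.pyRange_one_eq_nil (by omega : i + ((0:Nat):Int) ≤ i)]
    simp [pvD]
  | succ k ih =>
    intro i r acc hi
    rw [PySem.List.pyRange_one_cons (by push_cast; omega : i < i + ((k+1 : Nat) : Int))]
    have h2 : i + ((k+1 : Nat) : Int) = (i+1) + ((k:Nat) : Int) := by push_cast; ring
    simp only [List.foldl_cons]
    rw [h2, ih (i+1) (PySem.Int.floordiv r i) (acc ++ [PySem.Int.mod r i]) (by omega)]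
    rw [PySem.Int.floordiv_eq_ediv_of_pos (by omega : (0:Int) < i),
        PySem.Int.mod_eq_emod_of_pos (by omega : (0:Int) < i)]
    simp [pvD]

-- ===== VERDICT (by name: the statement is the Claim_ definition above) =====
theorem factorial_number_system_spec : Claim_equal_factorial_number_system := by
  intro rank n _
  unfold Spec_factorial_number_system factorial_number_system factorial_number_system_alt
  by_cases hn : 1 ≤ n
  · -- n ≥ 1: both sides equal pvS 1 rank (n-1)
    obtain ⟨k, hk⟩ : ∃ k : Nat, n = (k : Int) + 1 := ⟨(n - 1).toNat, by omega⟩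
    subst hk
    have hA := pvA_loop k rank []
    have h1 : (1:Int) + (k : Int) = (k:Int) + 1 := by ring
    have hB := pvB_loop k 1 rank [] (le_refl 1)
    rw [h1] at hB
    simp only [List.nil_append] at hA hB
    rw [hA]
    simp only [if_pos hn]
    rw [hB]
    exact (pvD_reverse k 1 rank (le_refl 1)).symm
  · -- n ≤ 0: both loops are empty
    rw [PySem.List.pyRange_neg_one_eq_nil (by omega : n ≤ 0),
        PySem.List.pyRange_one_eq_nil (by omega : n ≤ 1)]
    simp only [if_neg hn, List.foldl_nil, List.reverse_nil]
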